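-- pv_equiv track=rewrite | github.com/i-redbyte/leetcode | hard/count pairs with xor in a range/solution.py | xorPairs
-- ===== SOURCE A (Python) =====
-- from collections import Counter
-- from typing import List
--
-- def xorPairs(nums: List[int], high: int) -> int:
--     res = 0
--     for k in range(31, -1, -1):
--         target = high >> k
--         if target & 1 == 0:
--             continue
--         target -= 1
--         counter = Counter(num >> k for num in nums)
--         for mask in counter:
--             res += counter[mask] * counter[target ^ mask]
--             if mask == target ^ mask:
--                 res -= counter[mask]
--     return res // 2
-- ===== SOURCE B (Python) =====
-- def xorPairs(nums, high):
--     res = 0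
--     for k in range(32):
--         if not (high >> k) & 1:
--             continue
--         target = (high >> k) - 1
--         seen = {}
--         for x in nums:
--             p = x >> k
--             res += seen.get(target ^ p, 0)
--             seen[p] = seen.get(p, 0) + 1
--     return res
-- ===== Notes on version B (the rewrite author's own statement) =====
-- stated objective: alternative
-- what changed: Replaces A's offline per-bit Counter built over all numbers, the cross-multiplication over its keys with a self-pair correction, and the final res//2 by an online query-before-insert streaming pass per set bit of high with a plain dict, which counts each unordered pair exactly once.
import Mathlib
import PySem

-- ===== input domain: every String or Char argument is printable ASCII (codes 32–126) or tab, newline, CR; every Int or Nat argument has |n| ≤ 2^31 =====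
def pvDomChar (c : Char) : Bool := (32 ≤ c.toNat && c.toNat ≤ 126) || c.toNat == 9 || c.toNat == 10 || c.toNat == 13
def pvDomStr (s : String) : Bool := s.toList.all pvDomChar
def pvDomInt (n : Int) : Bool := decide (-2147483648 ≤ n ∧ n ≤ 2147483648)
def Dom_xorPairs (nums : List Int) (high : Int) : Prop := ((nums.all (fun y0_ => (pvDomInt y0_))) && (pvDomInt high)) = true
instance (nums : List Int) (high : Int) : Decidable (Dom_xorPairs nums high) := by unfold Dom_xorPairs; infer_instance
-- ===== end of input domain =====

-- B replaces A's offline per-bit Counter, the cross-multiplication over its keys and the final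
-- res//2 by an online query-before-insert streaming pass per set bit of high, counting each
-- unordered pair exactly once; same cost, proved to return exactly A's value on every input.

-- ===== PORT A =====
-- literal transliteration of A: for each bit k = 31..0 with high's bit set, a
-- Counter of the k-shifted values and a scan over its keys; result halved.
def xorPairs (nums : List Int) (high : Int) : Int :=
  let res : Int :=
    (PySem.List.pyRange 31 (-1) (-1)).foldl (fun res k =>
      -- k runs over 31,30,…,0, so k.toNat is exact for Python's `high >> k`
      let target := high >>> k.toNat
      if PySem.Int.band target 1 = 0 then res
      else
        let target := target - 1
        let counter := PySem.Dict.counter (nums.map (fun num : Int => num >>> k.toNat))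
        counter.keys.foldl (fun res mask =>
          let res := res + counter.getD mask 0 * counter.getD (PySem.Int.bxor target mask) 0
          if mask = PySem.Int.bxor target mask then res - counter.getD mask 0 else res) res) 0
  PySem.Int.floordiv res 2

-- ===== PORT B =====
-- B: for each set bit k of high (k = 0..31), one streaming pass over nums with a dict of
-- prefixes seen so far, querying before inserting (`range(32)` ported as List.range 32).
def xorPairs_alt (nums : List Int) (high : Int) : Int :=
  (List.range 32).foldl (fun (res : Int) (k : Nat) =>
    if PySem.Int.band (high >>> k) 1 = 0 then res
    else
      let target := (high >>> k) - 1
      (nums.foldl (fun (st : Int × PySem.Dict Int Int) (x : Int) =>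
          let p := x >>> k
          let res := st.1 + st.2.getD (PySem.Int.bxor target p) 0
          (res, st.2.insert p (st.2.getD p 0 + 1)))
        (res, (PySem.Dict.empty : PySem.Dict Int Int))).1) 0

-- ===== PRECONDITION & SPEC =====
def Spec_xorPairs (nums : List Int) (high : Int) (out : Int) : Prop := out = xorPairs_alt nums high
instance (nums : List Int) (high : Int) (out : Int) : Decidable (Spec_xorPairs nums high out) := by unfold Spec_xorPairs; infer_instance

-- ===== CLAIM (what is proved, stated in full; the proofs are below) =====
def Claim_equal_xorPairs : Prop := ∀ (nums : List Int) (high : Int), Dom_xorPairs nums high → Spec_xorPairs nums high (xorPairs nums high)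

-- ===== LEMMAS AND PROOFS =====

-- ---- generic list-sum helpers ----

theorem pvSumMapZero {α : Type} (l : List α) : (l.map (fun _ => (0 : Int))).sum = 0 := by
  induction l with
  | nil => rfl
  | cons x xs ih => simpa using ih

theorem pvSumMapSub {α : Type} (l : List α) (f g : α → Int) :
    (l.map (fun x => f x - g x)).sum = (l.map f).sum - (l.map g).sum := by
  induction l with
  | nil => rfl
  | cons x xs ih =>
    simp only [List.map_cons, List.sum_cons, ih]
    ring

theorem pvSumIndicZero (L : List Int) (x : Int) (f : Int → Int) (hx : x ∉ L) :
    (L.map (fun m => if m = x then f m else 0)).sum = 0 := by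
  have hz : ∀ m ∈ L, (if m = x then f m else 0) = (0 : Int) := by
    intro m hm
    have hmx : m ≠ x := by
      intro h
      rw [h] at hm
      exact hx hm
    exact if_neg hmx
  rw [List.map_congr_left hz]
  exact pvSumMapZero L

theorem pvSumIndic (L : List Int) (x : Int) (f : Int → Int) (hnd : L.Nodup) (hx : x ∈ L) :
    (L.map (fun m => if m = x then f m else 0)).sum = f x := by
  induction L with
  | nil => cases hx
  | cons y L ih =>
    rcases List.mem_cons.mp hx with h | h
    · subst h
      simp only [List.map_cons, List.sum_cons, if_pos trivial]
      rw [pvSumIndicZero L x f (List.nodup_cons.mp hnd).1, add_zero]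
    · have hyx : y ≠ x := fun hyx => (List.nodup_cons.mp hnd).1 (hyx ▸ h)
      simp only [List.map_cons, List.sum_cons, if_neg hyx]
      rw [ih (List.nodup_cons.mp hnd).2 h, zero_add]

theorem pvSumCountMul (ys L : List Int) (f : Int → Int) (hnd : L.Nodup)
    (hcov : ∀ y ∈ ys, y ∈ L) :
    (L.map (fun m => (ys.count m : Int) * f m)).sum = (ys.map f).sum := by
  induction ys with
  | nil => simpa using pvSumMapZero L
  | cons x xs ih =>
    have hx : x ∈ L := hcov x List.mem_cons_self
    have hrw : ∀ m ∈ L, ((x :: xs).count m : Int) * f m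
        = (xs.count m : Int) * f m + (if m = x then f m else 0) := by
      intro m _
      rw [List.count_cons]
      by_cases h : m = x
      · simp only [h, beq_self_eq_true, if_pos, if_true]
        push_cast
        ring
      · have hbx : ¬((x == m) = true) := by simpa using fun e => h e.symm
        simp [h, hbx]
    rw [List.map_congr_left hrw, PySem.List.sum_map_add_int,
        ih (fun y hy => hcov y (List.mem_cons_of_mem x hy)),
        pvSumIndic L x f hnd hx]
    rw [List.map_cons, List.sum_cons]
    ring

theorem pvSumMapConstOne (l : List Int) : (l.map (fun _ => (1 : Int))).sum = l.length := by
  induction l with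
  | nil => rfl
  | cons x xs ih =>
    simp only [List.map_cons, List.sum_cons, ih, List.length_cons]
    omega

theorem pvCountAsSum (ys : List Int) (v : Int) :
    ((ys.count v : Nat) : Int) = (ys.map (fun b => if b = v then (1 : Int) else 0)).sum := by
  induction ys with
  | nil => rfl
  | cons x xs ih =>
    rw [List.count_cons]
    by_cases h : x = v
    · simp only [List.map_cons, List.sum_cons, if_pos h, h, beq_self_eq_true, if_true]
      push_cast
      rw [ih]
      ring
    · have hbx : (x == v) = false := by simpa using h
      simp only [List.map_cons, List.sum_cons, if_neg h, hbx, if_false]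
      push_cast
      rw [ih]
      ring

-- ---- PySem.Int.bxor structure lemmas ----

theorem pvBxorOfNatOfNat (m n : Nat) :
    PySem.Int.bxor (Int.ofNat m) (Int.ofNat n) = Int.ofNat (m ^^^ n) := by
  simpa using PySem.Int.bxor_natCast m n

theorem pvBxorOfNatNegSucc (m n : Nat) :
    PySem.Int.bxor (Int.ofNat m) (Int.negSucc n) = Int.negSucc (m ^^^ n) := by
  simp only [PySem.Int.bxor, Int.negSucc_eq, Int.ofNat_eq_natCast]
  rw [if_pos (by omega : (0:Int) ≤ (m:Int)), if_neg (by omega : ¬(0:Int) ≤ -((n:Int) + 1))]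
  rw [show (- -((n:Int) + 1) - 1).toNat = n from by omega,
      show ((m : Int)).toNat = m from by omega]
  omega

theorem pvBxorNegSuccOfNat (m n : Nat) :
    PySem.Int.bxor (Int.negSucc m) (Int.ofNat n) = Int.negSucc (m ^^^ n) := by
  rw [PySem.Int.bxor_comm, pvBxorOfNatNegSucc, Nat.xor_comm]

theorem pvBxorNegSuccNegSucc (m n : Nat) :
    PySem.Int.bxor (Int.negSucc m) (Int.negSucc n) = Int.ofNat (m ^^^ n) := by
  simp only [PySem.Int.bxor, Int.negSucc_eq]
  rw [if_neg (by omega : ¬(0:Int) ≤ -((m:Int) + 1)), if_neg (by omega : ¬(0:Int) ≤ -((n:Int) + 1))]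
  rw [show (- -((m:Int) + 1) - 1).toNat = m from by omega,
      show (- -((n:Int) + 1) - 1).toNat = n from by omega]
  simp

theorem pvBxorCancel (a b : Int) : PySem.Int.bxor a (PySem.Int.bxor a b) = b := by
  rcases a with m | m <;> rcases b with n | n <;>
    simp only [pvBxorOfNatOfNat, pvBxorOfNatNegSucc, pvBxorNegSuccOfNat, pvBxorNegSuccNegSucc,
      Nat.xor_xor_cancel_left]

theorem pvBxorCancelRight (a b : Int) : PySem.Int.bxor (PySem.Int.bxor a b) b = a := by
  rw [show PySem.Int.bxor a b = PySem.Int.bxor b a from PySem.Int.bxor_comm a b,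
      PySem.Int.bxor_comm]
  exact pvBxorCancel b a

theorem pvBxorEqSelf (t m : Int) : m = PySem.Int.bxor t m ↔ t = 0 := by
  constructor
  · intro h
    have h2 := pvBxorCancelRight t m
    rw [← h] at h2
    rw [← h2, PySem.Int.bxor_self]
  · intro h
    subst h
    rw [PySem.Int.bxor_comm, PySem.Int.bxor_zero]

-- ---- A's Counter-keys scan: the ordered-pair count with self-pairs removed ----

-- number of ordered pairs (a, b) from ys (a ≠ b as positions) with a xor b = t
def pvG (ys : List Int) (t : Int) : Int :=
  (ys.map (fun y => ((ys.count (PySem.Int.bxor t y) : Nat) : Int))).sum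
    - (if t = 0 then (ys.length : Int) else 0)

theorem pvInner (ys : List Int) (t r0 : Int) :
    (PySem.Dict.counter ys).keys.foldl (fun res mask =>
        let res := res + (PySem.Dict.counter ys).getD mask 0
            * (PySem.Dict.counter ys).getD (PySem.Int.bxor t mask) 0
        if mask = PySem.Int.bxor t mask then res - (PySem.Dict.counter ys).getD mask 0
        else res) r0
      = r0 + pvG ys t := by
  have hnd : (PySem.Set.ofList ys).Nodup := PySem.Set.nodup_ofList ys
  have hcov : ∀ y ∈ ys, y ∈ PySem.Set.ofList ys := fun y hy => (PySem.Set.mem_ofList ys y).mpr hy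
  by_cases ht : t = 0
  · subst ht
    have hself : ∀ m : Int, PySem.Int.bxor 0 m = m := fun m => by
      rw [PySem.Int.bxor_comm, PySem.Int.bxor_zero]
    have hbody : (fun (res mask : Int) =>
        let res := res + (PySem.Dict.counter ys).getD mask 0
            * (PySem.Dict.counter ys).getD (PySem.Int.bxor 0 mask) 0
        if mask = PySem.Int.bxor 0 mask then res - (PySem.Dict.counter ys).getD mask 0
        else res)
        = fun res mask => res + ((ys.count mask : Int) * (ys.count mask : Int)
            - (ys.count mask : Int)) := by
      funext res mask
      simp only [hself, PySem.Dict.getD_counter, if_true]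
      ring
    rw [hbody, PySem.List.foldl_add, PySem.Dict.keys_counter]
    rw [pvSumMapSub (PySem.Set.ofList ys)
      (fun m => (ys.count m : Int) * (ys.count m : Int)) (fun m => (ys.count m : Int))]
    have h1 : ((PySem.Set.ofList ys).map (fun m => (ys.count m : Int) * (ys.count m : Int))).sum
        = (ys.map (fun y => ((ys.count y : Nat) : Int))).sum :=
      pvSumCountMul ys (PySem.Set.ofList ys) (fun m => (ys.count m : Int)) hnd hcov
    have h2 : ((PySem.Set.ofList ys).map (fun m => (ys.count m : Int))).sum
        = (ys.length : Int) := by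
      have := pvSumCountMul ys (PySem.Set.ofList ys) (fun _ => (1 : Int)) hnd hcov
      simp only [mul_one] at this
      rw [this, pvSumMapConstOne]
    rw [h1, h2]
    simp only [pvG, hself, if_true]
  · have hne : ∀ m : Int, ¬(m = PySem.Int.bxor t m) := fun m hm => ht ((pvBxorEqSelf t m).mp hm)
    have hbody : (fun (res mask : Int) =>
        let res := res + (PySem.Dict.counter ys).getD mask 0
            * (PySem.Dict.counter ys).getD (PySem.Int.bxor t mask) 0
        if mask = PySem.Int.bxor t mask then res - (PySem.Dict.counter ys).getD mask 0
        else res)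
        = fun res mask => res + (ys.count mask : Int) * (ys.count (PySem.Int.bxor t mask) : Int) := by
      funext res mask
      simp only [PySem.Dict.getD_counter, if_neg (hne mask)]
    rw [hbody, PySem.List.foldl_add, PySem.Dict.keys_counter]
    rw [pvSumCountMul ys (PySem.Set.ofList ys)
      (fun m => ((ys.count (PySem.Int.bxor t m) : Nat) : Int)) hnd hcov]
    simp only [pvG, if_neg ht, sub_zero]

-- ---- B's streaming pass: partners among the prefix, queried before insertion ----

-- pvT t s ps: B's streaming count over ps, with s the multiset already seen
def pvT (t : Int) : List Int → List Int → Int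
  | _, [] => 0
  | s, p :: ps => ((s.count (PySem.Int.bxor t p) : Nat) : Int) + pvT t (p :: s) ps

theorem pvTSplit (t : Int) (ps : List Int) : ∀ s : List Int,
    pvT t s ps = pvT t [] ps + (ps.map (fun p => ((s.count (PySem.Int.bxor t p) : Nat) : Int))).sum := by
  induction ps with
  | nil => intro s; simp [pvT]
  | cons p ps ih =>
    intro s
    simp only [pvT, List.map_cons, List.sum_cons, ih (p :: s), ih [p]]
    have hc : ∀ q : Int, (((p :: s).count q : Nat) : Int)
        = (([p].count q : Nat) : Int) + ((s.count q : Nat) : Int) := by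
      intro q
      have : (p :: s).count q = s.count q + [p].count q := by
        rw [List.count_cons, List.count_singleton]
      rw [this]
      push_cast
      ring
    have hmap : (ps.map (fun q => (((p :: s).count (PySem.Int.bxor t q) : Nat) : Int))).sum
        = (ps.map (fun q => (([p].count (PySem.Int.bxor t q) : Nat) : Int))).sum
          + (ps.map (fun q => ((s.count (PySem.Int.bxor t q) : Nat) : Int))).sum := by
      rw [← PySem.List.sum_map_add_int]
      exact congrArg List.sum (List.map_congr_left (fun q _ => hc (PySem.Int.bxor t q)))
    rw [hmap]
    have hz : (([] : List Int).count (PySem.Int.bxor t p) : Int) = 0 := by simp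
    rw [hz]
    ring

-- the unordered streaming count doubled gives the ordered count with self-pairs removed
theorem pvGEqTwoT (t : Int) (ys : List Int) : pvG ys t = 2 * pvT t [] ys := by
  induction ys with
  | nil => simp [pvG, pvT]
  | cons p rest ih =>
    have hsingle : ∀ q : Int, (([p].count (PySem.Int.bxor t q) : Nat) : Int)
        = if q = PySem.Int.bxor t p then 1 else 0 := by
      intro q
      rw [List.count_singleton]
      by_cases h : q = PySem.Int.bxor t p
      · have hq : PySem.Int.bxor t q = p := by rw [h, pvBxorCancel]
        simp only [hq, if_pos h, List.count_singleton, beq_self_eq_true, if_true]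
        rfl
      · have hne : PySem.Int.bxor t q ≠ p := by
          intro he
          exact h (by rw [← he, pvBxorCancel])
        have hb : (PySem.Int.bxor t q == p) = false := by simpa using hne
        simp [List.count_singleton, hb, h]
        exact fun e => hne e.symm
    have hrest : (rest.map (fun q => (([p].count (PySem.Int.bxor t q) : Nat) : Int))).sum
        = ((rest.count (PySem.Int.bxor t p) : Nat) : Int) := by
      rw [pvCountAsSum]
      exact congrArg List.sum (List.map_congr_left (fun q _ => hsingle q))
    -- expand pvG on p :: rest
    have hcnt : ∀ q : Int, (((p :: rest).count q : Nat) : Int)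
        = ((rest.count q : Nat) : Int) + (if q = p then 1 else 0) := by
      intro q
      rw [List.count_cons]
      by_cases h : q = p
      · simp only [h, beq_self_eq_true, if_true, if_pos]
        push_cast; ring
      · have hb : (q == p) = false := by simpa using h
        simp [hb, h]
        exact fun e => h e.symm
    have hG : pvG (p :: rest) t
        = 2 * ((rest.count (PySem.Int.bxor t p) : Nat) : Int) + pvG rest t := by
      simp only [pvG, List.map_cons, List.sum_cons, List.length_cons]
      have hmap : (rest.map (fun y => (((p :: rest).count (PySem.Int.bxor t y) : Nat) : Int))).sum
          = (rest.map (fun y => ((rest.count (PySem.Int.bxor t y) : Nat) : Int))).sum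
            + (rest.map (fun y => if PySem.Int.bxor t y = p then (1 : Int) else 0)).sum := by
        rw [← PySem.List.sum_map_add_int]
        exact congrArg List.sum (List.map_congr_left (fun y _ => hcnt (PySem.Int.bxor t y)))
      have hind : (rest.map (fun y => if PySem.Int.bxor t y = p then (1 : Int) else 0)).sum
          = ((rest.count (PySem.Int.bxor t p) : Nat) : Int) := by
        rw [pvCountAsSum]
        refine congrArg List.sum (List.map_congr_left ?_)
        intro y _
        refine if_congr ?_ rfl rfl
        constructor
        · intro h; rw [← h, pvBxorCancel]
        · intro h; rw [h, pvBxorCancel]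
      have hhd : (((p :: rest).count (PySem.Int.bxor t p) : Nat) : Int)
          = ((rest.count (PySem.Int.bxor t p) : Nat) : Int)
            + (if t = 0 then (1 : Int) else 0) := by
        rw [hcnt (PySem.Int.bxor t p)]
        have : (PySem.Int.bxor t p = p) ↔ t = 0 := by
          constructor
          · intro h; exact (pvBxorEqSelf t p).mp h.symm
          · intro h; subst h; rw [PySem.Int.bxor_comm, PySem.Int.bxor_zero]
        rw [if_congr this rfl rfl]
      rw [hmap, hind, hhd]
      by_cases h0 : t = 0
      · simp only [if_pos h0]
        push_cast
        ring
      · simp only [if_neg h0]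
        push_cast
        ring
    have hT : pvT t [] (p :: rest)
        = ((rest.count (PySem.Int.bxor t p) : Nat) : Int) + pvT t [] rest := by
      show ((([] : List Int).count (PySem.Int.bxor t p) : Nat) : Int) + pvT t [p] rest = _
      rw [pvTSplit t rest [p], hrest]
      simp only [List.count_nil]
      push_cast
      ring
    rw [hG, hT, ih]
    ring

-- ---- B's inner fold: the dict is a counter of the prefixes seen so far ----

theorem pvFoldB (high : Int) (k : Nat) (xs : List Int) : ∀ (r : Int) (d : PySem.Dict Int Int)
    (s : List Int), (∀ q : Int, d.getD q 0 = ((s.count q : Nat) : Int)) →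
    (xs.foldl (fun (st : Int × PySem.Dict Int Int) (x : Int) =>
        let p := x >>> k
        let res := st.1 + st.2.getD (PySem.Int.bxor ((high >>> k) - 1) p) 0
        (res, st.2.insert p (st.2.getD p 0 + 1))) (r, d)).1
      = r + pvT ((high >>> k) - 1) s (xs.map (fun x : Int => x >>> k)) := by
  induction xs with
  | nil => intro r d s _; simp [pvT]
  | cons x xs ih =>
    intro r d s hd
    have hins : ∀ q : Int, (d.insert (x >>> k) (d.getD (x >>> k) 0 + 1)).getD q 0
        = ((((x >>> k) :: s).count q : Nat) : Int) := by
      intro q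
      rw [PySem.Dict.getD_insert]
      by_cases h : q = x >>> k
      · rw [if_pos h, hd, h]
        simp only [List.count_cons, beq_self_eq_true, if_true]
        push_cast
        ring
      · have h2 : ¬ (x >>> k = q) := fun e => h e.symm
        rw [if_neg h, hd]
        simp [List.count_cons, h, h2]
    show (xs.foldl _ (r + d.getD (PySem.Int.bxor ((high >>> k) - 1) (x >>> k)) 0,
        d.insert (x >>> k) (d.getD (x >>> k) 0 + 1))).1 = _
    rw [ih _ _ (((x >>> k)) :: s) hins, hd]
    show _ = r + ((((s.count (PySem.Int.bxor ((high >>> k) - 1) (x >>> k)) : Nat)) : Int)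
        + pvT ((high >>> k) - 1) ((x >>> k) :: s) (xs.map (fun x : Int => x >>> k)))
    ring

-- ---- both outer loops as the same 32-term sum ----

theorem pvAltSum (nums : List Int) (high : Int) :
    xorPairs_alt nums high
      = ((List.range 32).map (fun k : Nat => if PySem.Int.band (high >>> k) 1 = 0 then (0 : Int)
          else pvT ((high >>> k) - 1) [] (nums.map (fun x : Int => x >>> k)))).sum := by
  have hbody : (fun (res : Int) (k : Nat) =>
      if PySem.Int.band (high >>> k) 1 = 0 then res
      else
        let target := (high >>> k) - 1
        (nums.foldl (fun (st : Int × PySem.Dict Int Int) (x : Int) =>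
            let p := x >>> k
            let res := st.1 + st.2.getD (PySem.Int.bxor target p) 0
            (res, st.2.insert p (st.2.getD p 0 + 1)))
          (res, (PySem.Dict.empty : PySem.Dict Int Int))).1)
      = fun (res : Int) (k : Nat) => res + (if PySem.Int.band (high >>> k) 1 = 0 then 0
          else pvT ((high >>> k) - 1) [] (nums.map (fun x : Int => x >>> k))) := by
    funext res k
    by_cases hb : PySem.Int.band (high >>> k) 1 = 0
    · rw [if_pos hb, if_pos hb, add_zero]
    · rw [if_neg hb, if_neg hb]
      exact pvFoldB high k nums res PySem.Dict.empty []
        (fun q => by simp [PySem.Dict.getD_empty])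
  have hdef : xorPairs_alt nums high = (List.range 32).foldl (fun (res : Int) (k : Nat) =>
      if PySem.Int.band (high >>> k) 1 = 0 then res
      else
        let target := (high >>> k) - 1
        (nums.foldl (fun (st : Int × PySem.Dict Int Int) (x : Int) =>
            let p := x >>> k
            let res := st.1 + st.2.getD (PySem.Int.bxor target p) 0
            (res, st.2.insert p (st.2.getD p 0 + 1)))
          (res, (PySem.Dict.empty : PySem.Dict Int Int))).1) 0 := by rfl
  rw [hdef, hbody, PySem.List.foldl_add, zero_add]

theorem pvASum (nums : List Int) (high : Int) :
    (PySem.List.pyRange 31 (-1) (-1)).foldl (fun res k =>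
        let target := high >>> k.toNat
        if PySem.Int.band target 1 = 0 then res
        else
          let target := target - 1
          let counter := PySem.Dict.counter (nums.map (fun num : Int => num >>> k.toNat))
          counter.keys.foldl (fun res mask =>
            let res := res + counter.getD mask 0 * counter.getD (PySem.Int.bxor target mask) 0
            if mask = PySem.Int.bxor target mask then res - counter.getD mask 0 else res) res) 0
      = ((List.range 32).map (fun k : Nat => if PySem.Int.band (high >>> k) 1 = 0 then (0 : Int)
          else pvG (nums.map (fun x : Int => x >>> k)) ((high >>> k) - 1))).sum := by
  have hbody : (fun (res : Int) (k : Int) =>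
      let target := high >>> ((k.toNat : Nat) : Int)
      if PySem.Int.band target 1 = 0 then res
      else
        let target := target - 1
        let counter := PySem.Dict.counter (nums.map (fun num : Int => num >>> ((k.toNat : Nat) : Int)))
        counter.keys.foldl (fun res mask =>
          let res := res + counter.getD mask 0 * counter.getD (PySem.Int.bxor target mask) 0
          if mask = PySem.Int.bxor target mask then res - counter.getD mask 0 else res) res)
      = fun (res : Int) (k : Int) => res + (if PySem.Int.band (high >>> k.toNat) 1 = 0 then 0
          else pvG (nums.map (fun x : Int => x >>> k.toNat)) ((high >>> k.toNat) - 1)) := by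
    funext res k
    simp only [Int.shiftRight_natCast_right]
    show (if PySem.Int.band (high >>> k.toNat) 1 = 0 then res
      else (PySem.Dict.counter (nums.map (fun num : Int => num >>> k.toNat))).keys.foldl
        (fun r mask =>
          let r := r + (PySem.Dict.counter (nums.map (fun num : Int => num >>> k.toNat))).getD mask 0
            * (PySem.Dict.counter (nums.map (fun num : Int => num >>> k.toNat))).getD
                (PySem.Int.bxor (high >>> k.toNat - 1) mask) 0
          if mask = PySem.Int.bxor (high >>> k.toNat - 1) mask
          then r - (PySem.Dict.counter (nums.map (fun num : Int => num >>> k.toNat))).getD mask 0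
          else r) res)
      = res + (if PySem.Int.band (high >>> k.toNat) 1 = 0 then 0
          else pvG (nums.map (fun x : Int => x >>> k.toNat)) ((high >>> k.toNat) - 1))
    by_cases hb : PySem.Int.band (high >>> k.toNat) 1 = 0
    · rw [if_pos hb, if_pos hb, add_zero]
    · rw [if_neg hb, if_neg hb]
      exact pvInner (nums.map (fun num : Int => num >>> k.toNat)) ((high >>> k.toNat) - 1) res
  rw [hbody, PySem.List.foldl_add, zero_add]
  rw [PySem.List.pyRange_neg_one_eq_reverse]
  norm_num
  rw [show ((32 : Int)) = ((32 : Nat) : Int) from rfl, PySem.List.pyRange_zero_nat, List.map_map]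
  refine congrArg List.sum (List.map_congr_left ?_)
  intro k _
  simp [Int.toNat_natCast]

-- the single fact behind the verdict: the two ports agree on every input
theorem pvMain (nums : List Int) (high : Int) : xorPairs nums high = xorPairs_alt nums high := by
  show PySem.Int.floordiv ((PySem.List.pyRange 31 (-1) (-1)).foldl _ 0) 2 = _
  rw [pvASum nums high, pvAltSum nums high]
  have hpt : ∀ k ∈ List.range 32,
      (if PySem.Int.band (high >>> k) 1 = 0 then (0 : Int)
        else pvG (nums.map (fun x : Int => x >>> k)) ((high >>> k) - 1))
      = (if PySem.Int.band (high >>> k) 1 = 0 then (0 : Int)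
        else pvT ((high >>> k) - 1) [] (nums.map (fun x : Int => x >>> k))) * 2 := by
    intro k _
    by_cases hb : PySem.Int.band (high >>> k) 1 = 0
    · rw [if_pos hb, if_pos hb, zero_mul]
    · rw [if_neg hb, if_neg hb, pvGEqTwoT]
      ring
  rw [List.map_congr_left hpt, List.sum_map_mul_right]
  rw [PySem.Int.floordiv_eq_ediv_of_pos (show (0:Int) < 2 from by norm_num)]
  omega

-- ===== VERDICT (by name: the statement is the Claim_ definition above) =====
theorem xorPairs_spec : Claim_equal_xorPairs := by
  intro nums high _
  show xorPairs nums high = xorPairs_alt nums high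
  exact pvMain nums high
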